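-- pv_equiv track=rewrite | github.com/sarenales/MAC | Lab01/Lab01SilviaArenales.py | TF
-- ===== SOURCE A (Python) =====
-- def TF(list1,list2):
--     a=0
--     b=0
--     for i in range(len(list1)):
--         for j in range(len(list2)):
--             if list1[i]>0 and list2[j]==True:
--                 a+=1
--             elif list1[i]<0 and list2[j]==False:
--                 b+=1
--     return a,b
-- ===== SOURCE B (Python) =====
-- def TF(list1, list2):
--     # closed form: each (positive, True) pair adds to a, each (negative, False) pair to b
--     pos = sum(1 for x in list1 if x > 0)
--     neg = sum(1 for x in list1 if x < 0)
--     trues = sum(1 for y in list2 if y == True)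
--     falses = sum(1 for y in list2 if y == False)
--     return pos * trues, neg * falses
-- ===== Notes on version B (the rewrite author's own statement) =====
-- stated objective: faster
-- what changed: Replaces the nested O(n*m) pair scan by one linear pass counting positives/negatives and True/False, returning the products.
import Mathlib
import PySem

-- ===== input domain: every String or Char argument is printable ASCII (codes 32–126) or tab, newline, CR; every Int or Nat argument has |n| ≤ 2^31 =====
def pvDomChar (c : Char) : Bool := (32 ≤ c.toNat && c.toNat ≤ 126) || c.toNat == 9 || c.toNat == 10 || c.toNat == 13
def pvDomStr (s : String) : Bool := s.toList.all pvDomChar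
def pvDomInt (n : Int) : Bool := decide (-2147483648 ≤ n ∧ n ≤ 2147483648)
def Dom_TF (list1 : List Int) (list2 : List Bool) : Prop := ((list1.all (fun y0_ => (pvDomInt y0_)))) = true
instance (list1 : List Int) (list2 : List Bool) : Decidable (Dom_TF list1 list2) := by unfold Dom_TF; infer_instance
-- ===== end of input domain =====

-- B replaces A's nested pair scan by linear counting and multiplication (faster, O(n+m) vs O(n*m)).

-- ===== PORT A =====
-- inner 'for j' loop over list2, updating the (a, b) accumulator
def TF_inner (x : Int) (list2 : List Bool) (ab : Int × Int) : Int × Int :=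
  list2.foldl (fun ab y =>
    if x > 0 ∧ y = true then (ab.1 + 1, ab.2)
    else if x < 0 ∧ y = false then (ab.1, ab.2 + 1)
    else ab) ab

def TF (list1 : List Int) (list2 : List Bool) : Int × Int :=
  list1.foldl (fun ab x => TF_inner x list2 ab) (0, 0)

-- ===== PORT B =====
def TF_alt (list1 : List Int) (list2 : List Bool) : Int × Int :=
  let pos : Int := (list1.countP (fun x => decide (x > 0)) : Nat)
  let neg : Int := (list1.countP (fun x => decide (x < 0)) : Nat)
  let trues : Int := (list2.countP (fun y => y == true) : Nat)
  let falses : Int := (list2.countP (fun y => y == false) : Nat)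
  (pos * trues, neg * falses)

-- ===== PRECONDITION & SPEC =====
def Spec_TF (list1 : List Int) (list2 : List Bool) (out : Int × Int) : Prop := out = TF_alt list1 list2
instance (list1 : List Int) (list2 : List Bool) (out : Int × Int) : Decidable (Spec_TF list1 list2 out) := by unfold Spec_TF; infer_instance

-- ===== CLAIM (what is proved, stated in full; the proofs are below) =====
def Claim_equal_TF : Prop := ∀ (list1 : List Int) (list2 : List Bool), Dom_TF list1 list2 → Spec_TF list1 list2 (TF list1 list2)

-- ===== LEMMAS AND PROOFS =====

theorem TF_inner_eq (x : Int) (l2 : List Bool) (ab : Int × Int) :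
    TF_inner x l2 ab =
      (ab.1 + (if x > 0 then (l2.countP (fun y => y == true) : Int) else 0),
       ab.2 + (if x < 0 then (l2.countP (fun y => y == false) : Int) else 0)) := by
  induction l2 generalizing ab with
  | nil => simp [TF_inner]
  | cons y ys ih =>
    rcases ab with ⟨a, b⟩
    show TF_inner x ys
        (if x > 0 ∧ y = true then (a + 1, b)
         else if x < 0 ∧ y = false then (a, b + 1) else (a, b)) = _
    rw [ih]
    rcases lt_trichotomy x 0 with h | h | h
    · cases y <;> simp [h, h.asymm, List.countP_cons] <;> push_cast <;> ring
    · cases y <;> simp [h, List.countP_cons]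
    · cases y <;> simp [h, h.asymm, List.countP_cons] <;> push_cast <;> ring

theorem TF_loop_eq (l1 : List Int) (l2 : List Bool) (ab : Int × Int) :
    l1.foldl (fun ab x => TF_inner x l2 ab) ab =
      (ab.1 + (l1.countP (fun x => decide (x > 0)) : Int) * (l2.countP (fun y => y == true) : Int),
       ab.2 + (l1.countP (fun x => decide (x < 0)) : Int) * (l2.countP (fun y => y == false) : Int)) := by
  induction l1 generalizing ab with
  | nil => simp
  | cons x xs ih =>
    simp only [List.foldl_cons]
    rw [ih, TF_inner_eq]
    rcases ab with ⟨a, b⟩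
    rcases lt_trichotomy x 0 with h | h | h
    · simp [h, h.asymm, List.countP_cons]; push_cast; ring
    · simp [h, List.countP_cons]
    · simp [h, h.asymm, List.countP_cons]; push_cast; ring

-- ===== VERDICT (by name: the statement is the Claim_ definition above) =====
theorem TF_spec : Claim_equal_TF := by
  intro l1 l2 _
  unfold Spec_TF TF TF_alt
  rw [TF_loop_eq]
  simp
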